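-- pv_equiv track=rewrite | github.com/Wpawlina/AGH-DSA-Course | Algorytmy/dynamiczne/twoTableSeries.py | twoTableSeries2
-- ===== SOURCE A (Python) =====
-- def twoTableSeries2(A,B):
--     n=len(A)
--     F=[[-1 for _ in range(n)]for _ in range(n)]
--     if A[0]==B[0]:
--         F[0][0]=1
--     else:
--         F[0][0]=0
--     cntA=0
--     cntB=0
--     for i in range(n):
--         if A[i]==B[0]:
--             cntA=1
--         F[i][0]=cntA
--         if A[0]==B[i]:
--             cntB=1
--         F[0][i]=cntB
--     def f(A,B,i,j):
--         if F[i][j]!=-1: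
--             return F[i][j]
--         best=0
--         if A[i]==B[j]:
--             best=f(A,B,i-1,j-1)+1
--         best=max(best,f(A,B,i-1,j),f(A,B,i,j-1))
--         F[i][j]=best
--         return F[i][j]
--     return f(A,B,n-1,n-1)
-- ===== SOURCE B (Python) =====
-- def twoTableSeries2(A, B):
--     n = len(A)
--     run = 0
--     prev = []
--     for j in range(n):
--         if A[0] == B[j]:
--             run = 1
--         prev.append(run)
--     colrun = prev[0]
--     for i in range(1, n):
--         if A[i] == B[0]:
--             colrun = 1
--         cur = [colrun]
--         for j in range(1, n):
--             diag = prev[j - 1] + 1 if A[i] == B[j] else 0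
--             cur.append(max(max(cur[-1], prev[j]), diag))
--         prev = cur
--     return prev[-1]
-- ===== Notes on version B (the rewrite author's own statement) =====
-- stated objective: alternative
-- what changed: The memoized top-down recursion over the full n x n table is replaced by a bottom-up iterative fill that keeps only a rolling previous row (same prefix-OR base row/column, same recurrence), using O(n) memory and no recursion.
import Mathlib
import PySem

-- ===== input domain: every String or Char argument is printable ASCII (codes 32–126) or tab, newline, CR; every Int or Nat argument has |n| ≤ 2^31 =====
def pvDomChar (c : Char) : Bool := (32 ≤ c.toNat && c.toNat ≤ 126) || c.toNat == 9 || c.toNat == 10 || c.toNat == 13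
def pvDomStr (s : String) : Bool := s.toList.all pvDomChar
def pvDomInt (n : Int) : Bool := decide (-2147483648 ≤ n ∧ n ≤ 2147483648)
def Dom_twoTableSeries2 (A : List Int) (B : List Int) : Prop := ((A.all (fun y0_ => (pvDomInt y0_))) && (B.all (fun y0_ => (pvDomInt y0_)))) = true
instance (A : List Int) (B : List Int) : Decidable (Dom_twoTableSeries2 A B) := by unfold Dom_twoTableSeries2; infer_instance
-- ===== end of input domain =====

-- B replaces the memoized top-down recursion with a bottom-up rolling-row fill of the same DP table (O(n) memory, no recursion).


-- ===== PORT A =====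
-- the mutable n×n list-of-lists table F is ported as a function Nat → Nat → Int with pointwise update
def pvUpd (F : Nat → Nat → Int) (i j : Nat) (v : Int) : Nat → Nat → Int :=
  fun a b => if a = i ∧ b = j then v else F a b

-- the inner memoized recursion f; fuel makes the recursion structural (never exhausted on the executed calls)
def pvMemoF (A : List Int) (B : List Int) : Nat → (Nat → Nat → Int) → Nat → Nat → Int × (Nat → Nat → Int)
  | 0, F, i, j => (F i j, F)
  | fuel+1, F, i, j =>
    if F i j ≠ -1 then (F i j, F)
    else
      let p1 : Int × (Nat → Nat → Int) :=
        if A.getD i 0 = B.getD j 0 then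
          let r := pvMemoF A B fuel F (i-1) (j-1)
          (r.1 + 1, r.2)
        else (0, F)
      let p2 := pvMemoF A B fuel p1.2 (i-1) j
      let p3 := pvMemoF A B fuel p2.2 i (j-1)
      let best := max (max p1.1 p2.1) p3.1
      (best, pvUpd p3.2 i j best)

def twoTableSeries2 (A : List Int) (B : List Int) : Int :=
  let n := A.length
  let F0 : Nat → Nat → Int := fun _ _ => -1
  let F1 := pvUpd F0 0 0 (if A.getD 0 0 = B.getD 0 0 then 1 else 0)
  let st := (List.range n).foldl (fun (s : (Nat → Nat → Int) × Int × Int) i =>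
      let cntA : Int := if A.getD i 0 = B.getD 0 0 then 1 else s.2.1
      let Fa := pvUpd s.1 i 0 cntA
      let cntB : Int := if A.getD 0 0 = B.getD i 0 then 1 else s.2.2
      let Fb := pvUpd Fa 0 i cntB
      (Fb, cntA, cntB)) (F1, (0 : Int), (0 : Int))
  (pvMemoF A B (2*n) st.1 (n-1) (n-1)).1

-- ===== PORT B =====
def twoTableSeries2_alt (A : List Int) (B : List Int) : Int :=
  let n := A.length
  let first := (List.range n).foldl (fun (s : List Int × Int) j =>
      let run : Int := if A.getD 0 0 = B.getD j 0 then 1 else s.2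
      (s.1 ++ [run], run)) ([], (0 : Int))
  let st := (List.range' 1 (n-1)).foldl (fun (s : List Int × Int) i =>
      let colrun : Int := if A.getD i 0 = B.getD 0 0 then 1 else s.2
      let cur := (List.range' 1 (n-1)).foldl (fun (cur : List Int) j =>
          let diag : Int := if A.getD i 0 = B.getD j 0 then s.1.getD (j-1) 0 + 1 else 0
          cur ++ [max (max (cur.getLastD 0) (s.1.getD j 0)) diag]) [colrun]
      (cur, colrun)) (first.1, first.1.getD 0 0)
  st.1.getLastD 0

-- ===== PRECONDITION & SPEC =====
-- Python A indexes A[0], B[i] for i < len(A): it raises IndexError when A is empty or B is shorter than A.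
def Pre_twoTableSeries2 (A : List Int) (B : List Int) : Prop := A ≠ [] ∧ A.length ≤ B.length
instance (A : List Int) (B : List Int) : Decidable (Pre_twoTableSeries2 A B) := by unfold Pre_twoTableSeries2; infer_instance
def pvWitness_twoTableSeries2 : List Int × List Int := ([1, 2, 1], [2, 1, 2, 3])

def Spec_twoTableSeries2 (A : List Int) (B : List Int) (out : Int) : Prop := out = twoTableSeries2_alt A B
instance (A : List Int) (B : List Int) (out : Int) : Decidable (Spec_twoTableSeries2 A B out) := by unfold Spec_twoTableSeries2; infer_instance

-- ===== CLAIM (what is proved, stated in full; the proofs are below) =====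
def Claim_equal_twoTableSeries2 : Prop := ∀ (A : List Int) (B : List Int), Dom_twoTableSeries2 A B → Pre_twoTableSeries2 A B → Spec_twoTableSeries2 A B (twoTableSeries2 A B)

-- ===== LEMMAS AND PROOFS =====

-- the common mathematical value of both DP tables
def pvBaseCol (A : List Int) (B : List Int) (i : Nat) : Int :=
  if (List.range (i+1)).any (fun k => decide (A.getD k 0 = B.getD 0 0)) then 1 else 0

def pvBaseRow (A : List Int) (B : List Int) (j : Nat) : Int :=
  if (List.range (j+1)).any (fun k => decide (A.getD 0 0 = B.getD k 0)) then 1 else 0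

def pvG (A : List Int) (B : List Int) : Nat → Nat → Int
  | i, j =>
    if i = 0 then pvBaseRow A B j
    else if j = 0 then pvBaseCol A B i
    else
      max (max (if A.getD i 0 = B.getD j 0 then pvG A B (i-1) (j-1) + 1 else 0) (pvG A B (i-1) j))
          (pvG A B i (j-1))
termination_by i j => i + j
decreasing_by all_goals omega

theorem pvG_base_row (A B : List Int) (j : Nat) : pvG A B 0 j = pvBaseRow A B j := by
  rw [pvG]; simp

theorem pvG_base_col (A B : List Int) (i : Nat) : pvG A B i 0 = pvBaseCol A B i := by
  rw [pvG]
  rcases Nat.eq_zero_or_pos i with h | h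
  · subst h; simp [pvBaseRow, pvBaseCol]
  · simp [Nat.pos_iff_ne_zero.mp h]

theorem pvG_rec (A B : List Int) (i j : Nat) (hi : i ≠ 0) (hj : j ≠ 0) :
    pvG A B i j =
      max (max (if A.getD i 0 = B.getD j 0 then pvG A B (i-1) (j-1) + 1 else 0) (pvG A B (i-1) j))
          (pvG A B i (j-1)) := by
  rw [pvG]; simp [hi, hj]

theorem pvG_nonneg (A B : List Int) : ∀ i j, 0 ≤ pvG A B i j := by
  intro i j
  generalize hk : i + j = k
  induction k using Nat.strong_induction_on generalizing i j with
  | _ k ih =>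
    rw [pvG]
    split_ifs with h1 h2 h3
    · unfold pvBaseRow; split_ifs <;> omega
    · unfold pvBaseCol; split_ifs <;> omega
    · have := ih (i - 1 + j) (by omega) (i-1) j rfl
      omega
    · have := ih (i - 1 + j) (by omega) (i-1) j rfl
      omega

theorem pvBaseCol_succ (A B : List Int) (i : Nat) :
    pvBaseCol A B (i+1) = if A.getD (i+1) 0 = B.getD 0 0 then 1 else pvBaseCol A B i := by
  unfold pvBaseCol
  rw [List.range_succ (n := i+1)]
  simp only [List.any_append, List.any_cons, List.any_nil, Bool.or_false, Bool.or_eq_true,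
    decide_eq_true_eq]
  split_ifs <;> tauto

theorem pvBaseRow_succ (A B : List Int) (j : Nat) :
    pvBaseRow A B (j+1) = if A.getD 0 0 = B.getD (j+1) 0 then 1 else pvBaseRow A B j := by
  unfold pvBaseRow
  rw [List.range_succ (n := j+1)]
  simp only [List.any_append, List.any_cons, List.any_nil, Bool.or_false, Bool.or_eq_true,
    decide_eq_true_eq]
  split_ifs <;> tauto

theorem pvBaseCol_zero (A B : List Int) :
    pvBaseCol A B 0 = if A.getD 0 0 = B.getD 0 0 then 1 else 0 := by
  unfold pvBaseCol
  simp [List.range_one]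

theorem pvBaseRow_zero (A B : List Int) :
    pvBaseRow A B 0 = if A.getD 0 0 = B.getD 0 0 then 1 else 0 := by
  unfold pvBaseRow
  simp [List.range_one]
def pvOk (A B : List Int) (F : Nat → Nat → Int) : Prop :=
  ∀ a b, F a b = -1 ∨ F a b = pvG A B a b

def pvBase (A B : List Int) (n : Nat) (F : Nat → Nat → Int) : Prop :=
  ∀ a b, a < n → b < n → (a = 0 ∨ b = 0) → F a b = pvG A B a b

theorem pvMemo_correct (A B : List Int) (n : Nat) :
    ∀ fuel F i j, i < n → j < n → i + j < fuel → pvOk A B F → pvBase A B n F →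
      (pvMemoF A B fuel F i j).1 = pvG A B i j ∧ pvOk A B (pvMemoF A B fuel F i j).2 ∧
        pvBase A B n (pvMemoF A B fuel F i j).2 := by
  intro fuel
  induction fuel with
  | zero => intro F i j hi hj hf; omega
  | succ fuel ih =>
    intro F i j hi hj hf hOk hBase
    by_cases hmem : F i j = -1
    · have hi0 : i ≠ 0 := by
        intro h0
        have h1 := hBase i j hi hj (Or.inl h0)
        have h2 := pvG_nonneg A B i j
        omega
      have hj0 : j ≠ 0 := by
        intro h0
        have h1 := hBase i j hi hj (Or.inr h0)
        have h2 := pvG_nonneg A B i j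
        omega
      simp only [pvMemoF, hmem, ne_eq, not_true_eq_false, if_false]
      -- the three recursive calls, in evaluation order
      by_cases heq : A.getD i 0 = B.getD j 0
      · obtain ⟨e1, ok1, ba1⟩ := ih F (i-1) (j-1) (by omega) (by omega) (by omega) hOk hBase
        obtain ⟨e2, ok2, ba2⟩ := ih (pvMemoF A B fuel F (i-1) (j-1)).2 (i-1) j (by omega) hj
          (by omega) ok1 ba1
        obtain ⟨e3, ok3, ba3⟩ := ih (pvMemoF A B fuel (pvMemoF A B fuel F (i-1) (j-1)).2 (i-1) j).2
          i (j-1) hi (by omega) (by omega) ok2 ba2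
        simp only [heq, if_true, e1, e2, e3]
        have hbest :
            max (max (pvG A B (i-1) (j-1) + 1) (pvG A B (i-1) j)) (pvG A B i (j-1)) = pvG A B i j := by
          rw [pvG_rec A B i j hi0 hj0, if_pos heq]
        refine ⟨hbest, ?_, ?_⟩
        · intro a b
          unfold pvUpd
          by_cases hab : a = i ∧ b = j
          · right; rw [if_pos hab, hbest, hab.1, hab.2]
          · rw [if_neg hab]; exact ok3 a b
        · intro a b ha hb hz
          unfold pvUpd
          have hab : ¬(a = i ∧ b = j) := by rintro ⟨rfl, rfl⟩; tauto
          rw [if_neg hab]; exact ba3 a b ha hb hz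
      · obtain ⟨e2, ok2, ba2⟩ := ih F (i-1) j (by omega) hj (by omega) hOk hBase
        obtain ⟨e3, ok3, ba3⟩ := ih (pvMemoF A B fuel F (i-1) j).2 i (j-1) hi (by omega)
          (by omega) ok2 ba2
        simp only [heq, if_false, e2, e3]
        have hbest : max (max (0 : Int) (pvG A B (i-1) j)) (pvG A B i (j-1)) = pvG A B i j := by
          rw [pvG_rec A B i j hi0 hj0, if_neg heq]
        refine ⟨hbest, ?_, ?_⟩
        · intro a b
          unfold pvUpd
          by_cases hab : a = i ∧ b = j
          · right; rw [if_pos hab, hbest, hab.1, hab.2]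
          · rw [if_neg hab]; exact ok3 a b
        · intro a b ha hb hz
          unfold pvUpd
          have hab : ¬(a = i ∧ b = j) := by rintro ⟨rfl, rfl⟩; tauto
          rw [if_neg hab]; exact ba3 a b ha hb hz
    · have hval : F i j = pvG A B i j := (hOk i j).resolve_left hmem
      simp only [pvMemoF, ne_eq, hmem, not_false_eq_true, if_true]
      exact ⟨hval, hOk, hBase⟩
theorem pvInit_fold (A B : List Int) :
    ∀ m, ((List.range m).foldl (fun (s : (Nat → Nat → Int) × Int × Int) i =>
        let cntA : Int := if A.getD i 0 = B.getD 0 0 then 1 else s.2.1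
        let Fa := pvUpd s.1 i 0 cntA
        let cntB : Int := if A.getD 0 0 = B.getD i 0 then 1 else s.2.2
        let Fb := pvUpd Fa 0 i cntB
        (Fb, cntA, cntB))
        (pvUpd (fun _ _ => -1) 0 0 (if A.getD 0 0 = B.getD 0 0 then 1 else 0), (0 : Int), (0 : Int))).2.1
        = (if m = 0 then 0 else pvBaseCol A B (m-1)) ∧
      ((List.range m).foldl (fun (s : (Nat → Nat → Int) × Int × Int) i =>
        let cntA : Int := if A.getD i 0 = B.getD 0 0 then 1 else s.2.1
        let Fa := pvUpd s.1 i 0 cntA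
        let cntB : Int := if A.getD 0 0 = B.getD i 0 then 1 else s.2.2
        let Fb := pvUpd Fa 0 i cntB
        (Fb, cntA, cntB))
        (pvUpd (fun _ _ => -1) 0 0 (if A.getD 0 0 = B.getD 0 0 then 1 else 0), (0 : Int), (0 : Int))).2.2
        = (if m = 0 then 0 else pvBaseRow A B (m-1)) ∧
      ∀ a b, ((List.range m).foldl (fun (s : (Nat → Nat → Int) × Int × Int) i =>
        let cntA : Int := if A.getD i 0 = B.getD 0 0 then 1 else s.2.1
        let Fa := pvUpd s.1 i 0 cntA
        let cntB : Int := if A.getD 0 0 = B.getD i 0 then 1 else s.2.2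
        let Fb := pvUpd Fa 0 i cntB
        (Fb, cntA, cntB))
        (pvUpd (fun _ _ => -1) 0 0 (if A.getD 0 0 = B.getD 0 0 then 1 else 0), (0 : Int), (0 : Int))).1 a b
        = (if a = 0 ∧ b = 0 then pvG A B 0 0
           else if b = 0 ∧ a < m then pvG A B a 0
           else if a = 0 ∧ b < m then pvG A B 0 b
           else -1) := by
  intro m
  induction m with
  | zero =>
    refine ⟨rfl, rfl, ?_⟩
    intro a b
    simp only [List.range_zero, List.foldl_nil, pvUpd]
    have h00 : pvG A B 0 0 = if A.getD 0 0 = B.getD 0 0 then 1 else 0 := by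
      rw [pvG_base_row, pvBaseRow_zero]
    rw [h00]
    split_ifs <;> omega
  | succ m ih =>
    obtain ⟨hA, hB, hF⟩ := ih
    rw [List.range_succ, List.foldl_append, List.foldl_cons, List.foldl_nil]
    have hcntA : (if A.getD m 0 = B.getD 0 0 then (1 : Int)
        else (if m = 0 then 0 else pvBaseCol A B (m-1))) = pvBaseCol A B m := by
      cases m with
      | zero => rw [pvBaseCol_zero]; simp
      | succ k => rw [pvBaseCol_succ]; simp
    have hcntB : (if A.getD 0 0 = B.getD m 0 then (1 : Int)
        else (if m = 0 then 0 else pvBaseRow A B (m-1))) = pvBaseRow A B m := by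
      cases m with
      | zero => rw [pvBaseRow_zero]; simp
      | succ k => rw [pvBaseRow_succ]; simp
    refine ⟨?_, ?_, ?_⟩
    · simp only [hA, hcntA]
      simp
    · simp only [hB, hcntB]
      simp
    · intro a b
      simp only [pvUpd, hA, hB, hF]
      simp only [hcntA, hcntB]
      by_cases h1 : a = 0 ∧ b = m
      · obtain ⟨rfl, hbm⟩ := h1
        have hbm' : m = b := hbm.symm
        subst hbm'
        by_cases hm : m = 0
        · subst hm; simp [pvG_base_row]
        · simp [hm, pvG_base_row]
      · by_cases h2 : a = m ∧ b = 0
        · obtain ⟨ham, rfl⟩ := h2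
          have ham' : m = a := ham.symm
          subst ham'
          have hm : m ≠ 0 := by rintro rfl; exact h1 ⟨rfl, rfl⟩
          simp [hm, pvG_base_col]
        · rw [if_neg h1, if_neg h2]
          split_ifs <;> first | rfl | omega
theorem pvInit_ok_base (A B : List Int) (n : Nat) :
    pvOk A B ((List.range n).foldl (fun (s : (Nat → Nat → Int) × Int × Int) i =>
        let cntA : Int := if A.getD i 0 = B.getD 0 0 then 1 else s.2.1
        let Fa := pvUpd s.1 i 0 cntA
        let cntB : Int := if A.getD 0 0 = B.getD i 0 then 1 else s.2.2
        let Fb := pvUpd Fa 0 i cntB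
        (Fb, cntA, cntB))
        (pvUpd (fun _ _ => -1) 0 0 (if A.getD 0 0 = B.getD 0 0 then 1 else 0), (0 : Int), (0 : Int))).1 ∧
    pvBase A B n ((List.range n).foldl (fun (s : (Nat → Nat → Int) × Int × Int) i =>
        let cntA : Int := if A.getD i 0 = B.getD 0 0 then 1 else s.2.1
        let Fa := pvUpd s.1 i 0 cntA
        let cntB : Int := if A.getD 0 0 = B.getD i 0 then 1 else s.2.2
        let Fb := pvUpd Fa 0 i cntB
        (Fb, cntA, cntB))
        (pvUpd (fun _ _ => -1) 0 0 (if A.getD 0 0 = B.getD 0 0 then 1 else 0), (0 : Int), (0 : Int))).1 := by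
  obtain ⟨-, -, hF⟩ := pvInit_fold A B n
  constructor
  · intro a b
    rw [hF]
    split_ifs with h1 h2 h3
    · right; rw [h1.1, h1.2]
    · right; rw [h2.1]
    · right; rw [h3.1]
    · left; rfl
  · intro a b ha hb hz
    rw [hF]
    split_ifs with h1 h2 h3
    · rw [h1.1, h1.2]
    · rw [h2.1]
    · rw [h3.1]
    · exfalso; rcases hz with rfl | rfl <;> tauto

theorem pvPortA_eq_g (A B : List Int) (h : A.length ≠ 0) :
    twoTableSeries2 A B = pvG A B (A.length - 1) (A.length - 1) := by
  obtain ⟨hOk, hBase⟩ := pvInit_ok_base A B A.length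
  have main := pvMemo_correct A B A.length (2 * A.length) _ (A.length - 1) (A.length - 1)
    (by omega) (by omega) (by omega) hOk hBase
  simpa only [twoTableSeries2] using main.1
theorem pvGetD_map_range (f : Nat → Int) (n k : Nat) (hk : k < n) :
    ((List.range n).map f).getD k 0 = f k := by
  rw [List.getD_eq_getElem?_getD, List.getElem?_map, List.getElem?_range hk]
  rfl

theorem pvGetLastD_map_range (f : Nat → Int) (n : Nat) (hn : n ≠ 0) :
    ((List.range n).map f).getLastD 0 = f (n - 1) := by
  cases n with
  | zero => omega
  | succ m =>
    rw [List.range_succ, List.map_append]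
    simp

theorem pvFirst_fold (A B : List Int) :
    ∀ m, (List.range m).foldl (fun (s : List Int × Int) j =>
        let run : Int := if A.getD 0 0 = B.getD j 0 then 1 else s.2
        (s.1 ++ [run], run)) ([], (0 : Int))
      = ((List.range m).map (fun t => pvG A B 0 t), if m = 0 then 0 else pvG A B 0 (m - 1)) := by
  intro m
  induction m with
  | zero => simp
  | succ m ih =>
    rw [List.range_succ, List.foldl_append, ih, List.foldl_cons, List.foldl_nil]
    have hrun : (if A.getD 0 0 = B.getD m 0 then (1 : Int)
        else if m = 0 then 0 else pvG A B 0 (m - 1)) = pvG A B 0 m := by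
      cases m with
      | zero => rw [pvG_base_row, pvBaseRow_zero]; simp
      | succ k =>
        rw [pvG_base_row A B k.succ, pvBaseRow_succ]
        simp [pvG_base_row]
    simp only [hrun]
    simp

theorem pvInner_fold (A B : List Int) (n i : Nat) (hi : i ≠ 0) (hin : i < n) :
    ∀ m, m ≤ n - 1 →
      (List.range' 1 m).foldl (fun (cur : List Int) j =>
          let diag : Int := if A.getD i 0 = B.getD j 0 then
              ((List.range n).map (fun t => pvG A B (i-1) t)).getD (j-1) 0 + 1 else 0
          cur ++ [max (max (cur.getLastD 0) (((List.range n).map (fun t => pvG A B (i-1) t)).getD j 0)) diag])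
        [pvG A B i 0]
      = (List.range (m+1)).map (fun t => pvG A B i t) := by
  intro m
  induction m with
  | zero => intro _; simp [List.range_one]
  | succ m ih =>
    intro hm
    rw [List.range'_concat, List.foldl_append, ih (by omega), List.foldl_cons, List.foldl_nil]
    have h1 : ((List.range (m+1)).map (fun t => pvG A B i t)).getLastD 0 = pvG A B i m := by
      rw [pvGetLastD_map_range _ _ (by omega)]; simp
    have h2 : ((List.range n).map (fun t => pvG A B (i-1) t)).getD (1+m) 0 = pvG A B (i-1) (1+m) :=
      pvGetD_map_range _ _ _ (by omega)
    have h3 : ((List.range n).map (fun t => pvG A B (i-1) t)).getD (1+m-1) 0 = pvG A B (i-1) m := by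
      rw [pvGetD_map_range _ _ _ (by omega)]; simp
    have hval : max (max (pvG A B i m) (pvG A B (i-1) (1+m)))
        (if A.getD i 0 = B.getD (1+m) 0 then pvG A B (i-1) m + 1 else 0) = pvG A B i (1+m) := by
      rw [pvG_rec A B i (1+m) hi (by omega)]
      have e1 : 1 + m - 1 = m := by omega
      rw [e1]
      by_cases heq : A.getD i 0 = B.getD (1+m) 0
      · simp only [if_pos heq]; omega
      · simp only [if_neg heq]; omega
    simp only [one_mul, h1, h2, h3, hval]
    have e3 : 1 + m = m + 1 := by omega
    rw [e3]
    simp [List.range_succ]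
theorem pvOuter_fold (A B : List Int) (n : Nat) :
    ∀ m, m ≤ n - 1 →
      (List.range' 1 m).foldl (fun (s : List Int × Int) i =>
          let colrun : Int := if A.getD i 0 = B.getD 0 0 then 1 else s.2
          let cur := (List.range' 1 (n-1)).foldl (fun (cur : List Int) j =>
              let diag : Int := if A.getD i 0 = B.getD j 0 then s.1.getD (j-1) 0 + 1 else 0
              cur ++ [max (max (cur.getLastD 0) (s.1.getD j 0)) diag]) [colrun]
          (cur, colrun))
        ((List.range n).map (fun t => pvG A B 0 t), pvG A B 0 0)
      = ((List.range n).map (fun t => pvG A B m t), pvG A B m 0) := by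
  intro m
  induction m with
  | zero => intro _; rfl
  | succ m ih =>
    intro hm
    rw [List.range'_concat, List.foldl_append, ih (by omega), List.foldl_cons, List.foldl_nil]
    simp only [one_mul]
    have hcol : (if A.getD (1+m) 0 = B.getD 0 0 then (1 : Int) else pvG A B m 0) = pvG A B (1+m) 0 := by
      rw [pvG_base_col A B m, pvG_base_col A B (1+m),
        show (1:Nat) + m = m + 1 from by omega, pvBaseCol_succ]
    have hin := pvInner_fold A B n (1+m) (by omega) (by omega) (n-1) le_rfl
    rw [show n - 1 + 1 = n from by omega] at hin
    simp only [Nat.add_sub_cancel_left] at hin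
    rw [hcol, hin, show (1:Nat) + m = m + 1 from by omega]
theorem pvPortB_eq_g (A B : List Int) (h : A.length ≠ 0) :
    twoTableSeries2_alt A B = pvG A B (A.length - 1) (A.length - 1) := by
  simp only [twoTableSeries2_alt, pvFirst_fold A B A.length]
  have hget : ((List.range A.length).map (fun t => pvG A B 0 t)).getD 0 0 = pvG A B 0 0 :=
    pvGetD_map_range _ _ _ (by omega)
  simp only [hget]
  rw [pvOuter_fold A B A.length (A.length - 1) le_rfl]
  exact pvGetLastD_map_range _ _ (by omega) |>.trans (by simp)


-- ===== VERDICT (by name: the statement is the Claim_ definition above) =====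
theorem twoTableSeries2_spec : Claim_equal_twoTableSeries2 := by
  intro A B _hdom hpre
  obtain ⟨hne, -⟩ := hpre
  have h : A.length ≠ 0 := by
    intro h0
    exact hne (List.length_eq_zero_iff.mp h0)
  unfold Spec_twoTableSeries2
  rw [pvPortA_eq_g A B h, pvPortB_eq_g A B h]
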